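-- pv_equiv track=rewrite | github.com/bob-pham/Project-Cornucopia | recall_scraper/recall_finder.py | filter_recall_for_name_canadian
-- ===== SOURCE A (Python) =====
-- def filter_recall_for_name_canadian(unfiltered: str) -> str:
--     """filters string for the product name, which is different with Canadian recall strings
--
--     Args:
--         unfiltered (str): the string with the name that has not yet been filtered
--
--     Returns:
--         str: returns a string that contains only the product name
--     """
--     unfiltered = unfiltered.split('brand')
--     unfiltered = unfiltered[len(unfiltered) - 1]
--     unfiltered = unfiltered.split('recalled due to ')
--     unfiltered = unfiltered[0]
--
--     start = 0;
--     end = len(unfiltered) - 1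
--
--     # determines and removes the leading and trailing non alphabetic characters
--     for x in range(len(unfiltered)):
--         if (not unfiltered[x].isalpha()):
--             start += 1
--         else:
--             break
--
--     for x in range(len(unfiltered) - 1, 0, -1):
--         if (not unfiltered[x].isalpha()):
--             end -= 1
--         else:
--             break
--
--     unfiltered = unfiltered[start:end + 1]
--
--     return unfiltered
-- ===== SOURCE B (Python) =====
-- def filter_recall_for_name_canadian(unfiltered: str) -> str:
--     """Same extraction, but the two directional trimming loops are replaced by one
--     sweep collecting all alphabetic indices and a single slice."""
--     s = unfiltered.split('brand')[-1].split('recalled due to ')[0]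
--     idx = [i for i, c in enumerate(s) if c.isalpha()]
--     if not idx:
--         return ''
--     return s[idx[0]:idx[-1] + 1]
-- ===== Notes on version B (the rewrite author's own statement) =====
-- stated objective: simpler
-- what changed: The two directional trimming loops (count leading non-alphabetic characters, then count trailing ones scanning backwards) are replaced by a single forward sweep that collects all alphabetic indices and one slice from the first to the last such index (empty string if there is none).
import Mathlib
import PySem

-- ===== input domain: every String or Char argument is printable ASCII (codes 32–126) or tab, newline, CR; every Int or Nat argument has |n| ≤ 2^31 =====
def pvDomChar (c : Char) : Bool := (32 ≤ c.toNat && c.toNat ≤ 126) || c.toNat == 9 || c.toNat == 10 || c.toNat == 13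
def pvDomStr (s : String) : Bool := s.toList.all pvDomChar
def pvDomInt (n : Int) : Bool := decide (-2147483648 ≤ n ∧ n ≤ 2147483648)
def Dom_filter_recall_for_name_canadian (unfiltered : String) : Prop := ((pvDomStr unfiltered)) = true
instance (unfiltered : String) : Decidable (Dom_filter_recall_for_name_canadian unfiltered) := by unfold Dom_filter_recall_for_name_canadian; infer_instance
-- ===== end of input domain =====

-- B replaces A's two directional trimming loops by one sweep that collects all alphabetic
-- indices and slices once between the first and the last (objective: simpler).


-- ===== PORT A =====
-- transliteration of a 'for …: if not s[x].isalpha(): counter += 1 else: break' scan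
def pvScanNonAlpha : List Char → Nat
  | [] => 0
  | c :: cs => if PySem.Chars.isalpha c then 0 else pvScanNonAlpha cs + 1

-- A's trimming phase: the two counting loops (the backward loop runs over indices
-- len-1 … 1, i.e. scans (s.drop 1).reverse) followed by the slice s[start:end+1]
def pvTrimA (s : List Char) : List Char :=
  let start : Nat := pvScanNonAlpha s
  let e : Int := ((s.length : Int) - 1) - (pvScanNonAlpha ((s.drop 1).reverse) : Nat)
  PySem.List.slice s (some ((start : Nat) : Int)) (some (e + 1))

def filter_recall_for_name_canadian (unfiltered : String) : String :=
  let parts := PySem.Chars.splitOn unfiltered.toList "brand".toList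
  let u1 := PySem.List.pyGetD parts ((parts.length : Int) - 1) []
  let parts2 := PySem.Chars.splitOn u1 "recalled due to ".toList
  let s := PySem.List.pyGetD parts2 0 []
  String.ofList (pvTrimA s)

-- ===== PORT B =====
-- B's picking phase: one sweep collecting the alphabetic indices, then a single slice
def pvPickB (s : List Char) : String :=
  let idx : List Int := ((PySem.List.enumerate s).filter (fun pr => PySem.Chars.isalpha pr.2)).map (fun pr => pr.1)
  match idx with
  | [] => ""
  | i :: rest => String.ofList (PySem.List.slice s (some i) (some ((i :: rest).getLast (List.cons_ne_nil i rest) + 1)))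

def filter_recall_for_name_canadian_alt (unfiltered : String) : String :=
  pvPickB (PySem.List.pyGetD (PySem.Chars.splitOn (PySem.List.pyGetD (PySem.Chars.splitOn unfiltered.toList "brand".toList) (-1) []) "recalled due to ".toList) 0 [])

-- ===== PRECONDITION & SPEC =====
def Spec_filter_recall_for_name_canadian (unfiltered : String) (out : String) : Prop := out = filter_recall_for_name_canadian_alt unfiltered
instance (unfiltered : String) (out : String) : Decidable (Spec_filter_recall_for_name_canadian unfiltered out) := by unfold Spec_filter_recall_for_name_canadian; infer_instance

-- ===== CLAIM =====
def Claim_equal_filter_recall_for_name_canadian : Prop := ∀ (unfiltered : String), Dom_filter_recall_for_name_canadian unfiltered → Spec_filter_recall_for_name_canadian unfiltered (filter_recall_for_name_canadian unfiltered)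

-- ===== LEMMAS AND PROOFS =====
def pvIdx (s : List Char) (a : Int) : List Int :=
  ((PySem.List.enumerate s a).filter (fun pr => PySem.Chars.isalpha pr.2)).map (fun pr => pr.1)

theorem pvIdx_cons (c : Char) (cs : List Char) (a : Int) :
    pvIdx (c :: cs) a = if PySem.Chars.isalpha c then a :: pvIdx cs (a + 1) else pvIdx cs (a + 1) := by
  simp [pvIdx, PySem.List.enumerate_cons, List.filter_cons]
  split <;> simp

theorem pvScan_eq_findIdx (l : List Char) :
    pvScanNonAlpha l = l.findIdx (fun c => PySem.Chars.isalpha c) := by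
  induction l with
  | nil => rfl
  | cons c cs ih =>
    rw [List.findIdx_cons]
    by_cases hc : PySem.Chars.isalpha c <;> simp [pvScanNonAlpha, hc, ih]

theorem pvIdx_eq_nil_iff (s : List Char) (a : Int) :
    pvIdx s a = [] ↔ ∀ c ∈ s, PySem.Chars.isalpha c = false := by
  induction s generalizing a with
  | nil => simp [pvIdx]
  | cons c cs ih =>
    rw [pvIdx_cons]
    by_cases h : PySem.Chars.isalpha c <;> simp [h, ih]

theorem pvIdx_head? (s : List Char) (a : Int) (h : pvIdx s a ≠ []) :
    (pvIdx s a).head? = some (a + (s.findIdx (fun c => PySem.Chars.isalpha c) : Int)) := by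
  induction s generalizing a with
  | nil => simp [pvIdx] at h
  | cons c cs ih =>
    by_cases hc : PySem.Chars.isalpha c
    · simp [pvIdx_cons, hc, List.findIdx_cons]
    · have h' : pvIdx cs (a + 1) ≠ [] := by
        intro hn; apply h; rw [pvIdx_cons]; simp [hc, hn]
      rw [pvIdx_cons, if_neg (by simp [hc]), ih _ h', List.findIdx_cons]
      simp [hc]
      omega

theorem pvRevStep (c : Char) (cs : List Char) (hany : ∃ x ∈ cs, PySem.Chars.isalpha x = true) :
    (c :: cs).reverse.findIdx (fun c => PySem.Chars.isalpha c)
      = cs.reverse.findIdx (fun c => PySem.Chars.isalpha c) := by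
  have hlt : cs.reverse.findIdx (fun c => PySem.Chars.isalpha c) < cs.reverse.length :=
    List.findIdx_lt_length.2 (by simpa using hany)
  rw [List.reverse_cons, List.findIdx_append, if_pos hlt]

theorem pvIdx_getLast (s : List Char) (a : Int) (h : pvIdx s a ≠ []) :
    (pvIdx s a).getLast h = a + ((s.length : Int) - 1 - (s.reverse.findIdx (fun c => PySem.Chars.isalpha c) : Int)) := by
  induction s generalizing a with
  | nil => simp [pvIdx] at h
  | cons c cs ih =>
    by_cases hc : PySem.Chars.isalpha c
    · by_cases hcs : pvIdx cs (a + 1) = []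
      · have hall : ∀ x ∈ cs, PySem.Chars.isalpha x = false := (pvIdx_eq_nil_iff cs (a+1)).1 hcs
        have h1 : cs.reverse.findIdx (fun c => PySem.Chars.isalpha c) = cs.reverse.length :=
          List.findIdx_eq_length.2 (by intro x hx; exact hall x (by simpa using hx))
        have hrev : (c :: cs).reverse.findIdx (fun c => PySem.Chars.isalpha c) = cs.length := by
          rw [List.reverse_cons, List.findIdx_append, if_neg (by omega)]
          simp [List.findIdx_cons, hc]
        have e : pvIdx (c :: cs) a = [a] := by rw [pvIdx_cons]; simp [hc, hcs]
        rw [List.getLast_congr _ (by simp) e, hrev]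
        simp
      · have hany : ∃ x ∈ cs, PySem.Chars.isalpha x = true := by
          by_contra hno
          push Not at hno
          exact hcs ((pvIdx_eq_nil_iff cs (a+1)).2 (by simpa using hno))
        have e : pvIdx (c :: cs) a = a :: pvIdx cs (a + 1) := by rw [pvIdx_cons]; simp [hc]
        rw [List.getLast_congr _ (by simp) e, List.getLast_cons hcs, ih _ hcs, pvRevStep c cs hany]
        have hlt : cs.reverse.findIdx (fun c => PySem.Chars.isalpha c) < cs.reverse.length :=
          List.findIdx_lt_length.2 (by simpa using hany)
        simp at hlt ⊢
        omega
    · have h' : pvIdx cs (a + 1) ≠ [] := by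
        intro hn; apply h; rw [pvIdx_cons]; simp [hc, hn]
      have hany : ∃ x ∈ cs, PySem.Chars.isalpha x = true := by
        by_contra hno
        push Not at hno
        exact h' ((pvIdx_eq_nil_iff cs (a+1)).2 (by simpa using hno))
      have e : pvIdx (c :: cs) a = pvIdx cs (a + 1) := by rw [pvIdx_cons]; simp [hc]
      rw [List.getLast_congr _ h' e, ih _ h', pvRevStep c cs hany]
      simp
      omega

-- A's backward scan (over indices len-1 … 1) finds the same position as a scan of the full reverse,
-- provided some alphabetic character exists
theorem pvDropOneRev (s : List Char) (hany : ∃ x ∈ s, PySem.Chars.isalpha x = true) :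
    ((s.drop 1).reverse).findIdx (fun c => PySem.Chars.isalpha c)
      = s.reverse.findIdx (fun c => PySem.Chars.isalpha c) := by
  match s with
  | [] => simp at hany
  | c :: cs =>
    simp only [List.drop_one, List.tail_cons]
    by_cases hcs : ∃ x ∈ cs, PySem.Chars.isalpha x = true
    · exact (pvRevStep c cs hcs).symm
    · push Not at hcs
      have h1 : cs.reverse.findIdx (fun c => PySem.Chars.isalpha c) = cs.reverse.length :=
        List.findIdx_eq_length.2 (by intro x hx; simpa using hcs x (by simpa using hx))
      have hc : PySem.Chars.isalpha c = true := by
        rcases hany with ⟨x, hx, hpx⟩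
        rcases List.mem_cons.1 hx with rfl | hx'
        · exact hpx
        · exact absurd hpx (by simp [hcs x hx'])
      rw [List.reverse_cons, List.findIdx_append, if_neg (by omega), h1]
      simp [List.findIdx_cons, hc]

theorem pyGetD_last_of_neg_one (xs : List (List Char)) (d : List Char) :
    PySem.List.pyGetD xs (-1) d = PySem.List.pyGetD xs ((xs.length : Int) - 1) d := by
  cases xs with
  | nil => simp [PySem.List.pyGetD, PySem.List.pyGet?, PySem.List.pyIdx?]
  | cons x t => simp [PySem.List.pyGetD, PySem.List.pyGet?, PySem.List.pyIdx?]

theorem pv_main (s : List Char) :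
    String.ofList (pvTrimA s) = pvPickB s := by
  unfold pvTrimA pvPickB
  have hidx : ((PySem.List.enumerate s).filter (fun pr => PySem.Chars.isalpha pr.2)).map (fun pr => pr.1) = pvIdx s 0 := rfl
  by_cases hany : ∃ x ∈ s, PySem.Chars.isalpha x = true
  · have hne : pvIdx s 0 ≠ [] := by
      intro hn
      rcases hany with ⟨x, hx, hpx⟩
      have := (pvIdx_eq_nil_iff s 0).1 hn x hx
      simp [this] at hpx
    obtain ⟨i, rest, he⟩ := List.exists_cons_of_ne_nil hne
    rw [hidx, he]
    change _ = String.ofList (PySem.List.slice s (some i) (some ((i :: rest).getLast (List.cons_ne_nil i rest) + 1)))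
    have hhead : i = (s.findIdx (fun c => PySem.Chars.isalpha c) : Int) := by
      have h1 := pvIdx_head? s 0 hne
      rw [he] at h1
      simpa using h1
    have hlast : (i :: rest).getLast (List.cons_ne_nil i rest)
        = ((s.length : Int) - 1 - (s.reverse.findIdx (fun c => PySem.Chars.isalpha c) : Int)) := by
      have h2 := pvIdx_getLast s 0 hne
      rw [List.getLast_congr (by simp) hne he.symm, h2]
      ring
    rw [hlast, hhead, pvScan_eq_findIdx, pvScan_eq_findIdx, pvDropOneRev s hany]
  · have hnil : pvIdx s 0 = [] := (pvIdx_eq_nil_iff s 0).2 (by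
      intro c hcm; by_contra hb; exact hany ⟨c, hcm, by simpa using hb⟩)
    rw [hidx, hnil]
    have hall : ∀ c ∈ s, PySem.Chars.isalpha c = false := by
      intro c hcm; by_contra hb; exact hany ⟨c, hcm, by simpa using hb⟩
    rcases List.eq_nil_or_concat s with rfl | ⟨t, x, rfl⟩
    · rfl
    · simp only [List.concat_eq_append] at hall ⊢
      have hscan1 : pvScanNonAlpha (t ++ [x]) = (t ++ [x]).length := by
        rw [pvScan_eq_findIdx]; exact List.findIdx_eq_length.2 hall
      have hscan2 : pvScanNonAlpha (((t ++ [x]).drop 1).reverse) = t.length := by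
        rw [pvScan_eq_findIdx]
        have h2 : List.findIdx (fun c => PySem.Chars.isalpha c) (((t ++ [x]).drop 1).reverse)
            = ((t ++ [x]).drop 1).reverse.length :=
          List.findIdx_eq_length.2 (fun c hc => hall c
            (List.mem_of_mem_drop (List.mem_reverse.1 hc)))
        rw [h2]; simp
      rw [hscan1, hscan2]
      have e1 : ((((t ++ [x]).length : Int) - 1) - ((t.length : Nat) : Int)) + 1 = 1 := by
        simp only [List.length_append, List.length_cons, List.length_nil]; push_cast; ring
      rw [e1, PySem.List.slice_toNat _ (by positivity) (by norm_num)]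
      simp

-- ===== VERDICT =====
theorem filter_recall_for_name_canadian_spec : Claim_equal_filter_recall_for_name_canadian := by
  intro u _
  unfold Spec_filter_recall_for_name_canadian filter_recall_for_name_canadian filter_recall_for_name_canadian_alt
  rw [pyGetD_last_of_neg_one (PySem.Chars.splitOn u.toList "brand".toList) []]
  exact pv_main _
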